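-- pv_equiv track=rewrite | github.com/samuel-tranchet/raspydarts-sources | pydarts/games/classic/Kinito.py | get_possibilitirs
-- ===== SOURCE A (Python) =====
-- def get_possibilitirs(target_score, kinito=False):
--     '''
--     Get possibilities in ordre to light leds
--     '''
--     possibilities = []
--     for multiplier in ['S', 'D', 'T']:
--         if multiplier == 'S':
--             mult = 1
--         elif multiplier == 'D':
--             mult = 2
--         else:
--             mult=3
--
--         for i in range(1, 22):
--             if i == 21:
--                 if multiplier == 'T':
--                     continue
--                 i = 25
--
--             if not kinito and i * mult >= target_score:
--                 if i == 25:
--                     i = 'B'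
--                 possibilities.append(f'{multiplier}{i}')
--
--             if kinito and i * mult == target_score:
--                 if i == 25:
--                     i = 'B'
--                 possibilities.append(f'{multiplier}{i}')
--
--     return possibilities
-- ===== SOURCE B (Python) =====
-- def get_possibilitirs(target_score, kinito=False):
--     '''
--     Get possibilities in ordre to light leds
--     '''
--     # Arithmetic, not enumeration: for each multiplier compute directly which
--     # segment values qualify (a divisibility test for ==, a ceiling-division
--     # lower bound for >=), plus the bull for S and D.
--     out = []
--     for mult, prefix in ((1, 'S'), (2, 'D'), (3, 'T')):
--         if kinito:
--             q, r = divmod(target_score, mult)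
--             if r == 0 and 1 <= q <= 20:
--                 out.append(f'{prefix}{q}')
--             if prefix != 'T' and target_score == 25 * mult:
--                 out.append(f'{prefix}B')
--         else:
--             lo = max(1, -(-target_score // mult))  # ceil(target/mult), at least 1
--             out.extend(f'{prefix}{v}' for v in range(lo, 21))
--             if prefix != 'T' and 25 * mult >= target_score:
--                 out.append(f'{prefix}B')
--     return out
-- ===== Notes on version B (the rewrite author's own statement) =====
-- stated objective: alternative
-- what changed: A enumerates all 63 candidate throws and tests each against the target; B never enumerates: per multiplier it computes the qualifying values directly, by a divisibility/quotient-range test for the kinito (==) case and a ceiling-division lower bound for the >= case, emitting only the matching labels.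
import Mathlib
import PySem

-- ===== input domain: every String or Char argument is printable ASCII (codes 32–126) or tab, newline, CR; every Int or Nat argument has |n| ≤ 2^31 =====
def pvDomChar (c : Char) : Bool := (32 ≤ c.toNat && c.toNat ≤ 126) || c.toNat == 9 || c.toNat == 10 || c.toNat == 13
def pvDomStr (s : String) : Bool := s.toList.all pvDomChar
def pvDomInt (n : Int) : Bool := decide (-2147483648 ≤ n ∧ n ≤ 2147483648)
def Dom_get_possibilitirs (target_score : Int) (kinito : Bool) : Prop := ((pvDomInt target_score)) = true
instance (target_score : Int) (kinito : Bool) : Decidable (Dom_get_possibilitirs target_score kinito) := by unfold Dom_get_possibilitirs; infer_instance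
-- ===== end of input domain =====

-- B replaces A's enumerate-all-63-throws-and-test loops by direct arithmetic per multiplier:
-- a divisibility test (==) or a ceiling-division lower bound (>=) picks the qualifying values
-- without testing each one (simpler/alternative; same return value).

-- ===== PORT A =====
def get_possibilitirs (target_score : Int) (kinito : Bool) : List String :=
  (["S", "D", "T"]).foldl (fun possibilities multiplier =>
    let mult : Int := if multiplier = "S" then 1 else if multiplier = "D" then 2 else 3
    (PySem.List.pyRange 1 22 1).foldl (fun acc i0 =>
      if i0 = 21 ∧ multiplier = "T" then acc  -- 'continue'
      else
        let i : Int := if i0 = 21 then 25 else i0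
        -- the "i = 'B'" reassignment only affects the formatted string
        let lbl : String := multiplier ++ (if i = 25 then "B" else PySem.Int.toStr i)
        let acc := if !kinito ∧ i * mult ≥ target_score then acc ++ [lbl] else acc
        if kinito ∧ i * mult = target_score then acc ++ [lbl] else acc)
      possibilities) []

-- ===== PORT B =====
def get_possibilitirs_alt (target_score : Int) (kinito : Bool) : List String :=
  ([((1 : Int), "S"), (2, "D"), (3, "T")]).foldl (fun out p =>
    if kinito then
      let q := PySem.Int.floordiv target_score p.1
      let r := PySem.Int.mod target_score p.1
      let out := if r = 0 ∧ 1 ≤ q ∧ q ≤ 20 then out ++ [p.2 ++ PySem.Int.toStr q] else out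
      if p.2 ≠ "T" ∧ target_score = 25 * p.1 then out ++ [p.2 ++ "B"] else out
    else
      let lo := max 1 (-(PySem.Int.floordiv (-target_score) p.1))  -- ceil(target/mult), at least 1
      let out := out ++ (PySem.List.pyRange lo 21 1).map (fun v => p.2 ++ PySem.Int.toStr v)
      if p.2 ≠ "T" ∧ 25 * p.1 ≥ target_score then out ++ [p.2 ++ "B"] else out) []

-- ===== PRECONDITION & SPEC =====
def Spec_get_possibilitirs (target_score : Int) (kinito : Bool) (out : List String) : Prop := out = get_possibilitirs_alt target_score kinito
instance (target_score : Int) (kinito : Bool) (out : List String) : Decidable (Spec_get_possibilitirs target_score kinito out) := by unfold Spec_get_possibilitirs; infer_instance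

-- ===== CLAIM (what is proved, stated in full; the proofs are below) =====
def Claim_equal_get_possibilitirs : Prop := ∀ (target_score : Int) (kinito : Bool), Dom_get_possibilitirs target_score kinito → Spec_get_possibilitirs target_score kinito (get_possibilitirs target_score kinito)

-- ===== LEMMAS AND PROOFS =====

-- [1..20] of A's range, with the 21↦25 bull slot split off
theorem pv_range_split : PySem.List.pyRange 1 22 1 = PySem.List.pyRange 1 21 1 ++ [21] := by decide

-- filtering an ascending range by a lower bound IS the truncated range
theorem pv_filter_le (c : Int) : ∀ (n : Nat) (a b : Int), (b - a).toNat ≤ n →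
    (PySem.List.pyRange a b 1).filter (fun v => decide (c ≤ v)) = PySem.List.pyRange (max a c) b 1 := by
  intro n
  induction n with
  | zero =>
    intro a b h
    rw [PySem.List.pyRange_one_eq_nil (by omega), PySem.List.pyRange_one_eq_nil (by omega)]
    rfl
  | succ n ih =>
    intro a b h
    by_cases hab : b ≤ a
    · rw [PySem.List.pyRange_one_eq_nil hab, PySem.List.pyRange_one_eq_nil (by omega)]
      rfl
    · rw [PySem.List.pyRange_one_cons (by omega)]
      by_cases hca : c ≤ a
      · rw [List.filter_cons_of_pos (by simpa using hca), ih (a + 1) b (by omega)]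
        have h1 : max (a + 1) c = a + 1 := by omega
        have h2 : max a c = a := by omega
        rw [h1, h2, ← PySem.List.pyRange_one_cons (by omega)]
      · rw [List.filter_cons_of_neg (by simpa using hca), ih (a + 1) b (by omega)]
        have h1 : max (a + 1) c = max a c := by omega
        rw [h1]

-- filtering an ascending range by an equality test keeps at most the one element
theorem pv_filter_eq (q : Int) : ∀ (n : Nat) (a b : Int), (b - a).toNat ≤ n →
    (PySem.List.pyRange a b 1).filter (fun v => decide (v = q)) =
      if a ≤ q ∧ q < b then [q] else [] := by
  intro n
  induction n with
  | zero =>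
    intro a b h
    rw [PySem.List.pyRange_one_eq_nil (by omega), if_neg (by omega)]
    rfl
  | succ n ih =>
    intro a b h
    by_cases hab : b ≤ a
    · rw [PySem.List.pyRange_one_eq_nil hab, if_neg (by omega)]
      rfl
    · rw [PySem.List.pyRange_one_cons (by omega)]
      by_cases hqa : a = q
      · rw [List.filter_cons_of_pos (by simpa using hqa), ih (a + 1) b (by omega),
          if_neg (by omega), if_pos (by omega), hqa]
      · rw [List.filter_cons_of_neg (by simpa using hqa), ih (a + 1) b (by omega)]
        have : (a + 1 ≤ q ∧ q < b) ↔ (a ≤ q ∧ q < b) := by omega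
        simp only [this]

-- ceiling-division bracket: v ≥ ⌈t/m⌉ ↔ v*m ≥ t  (m > 0)
theorem pv_ceil_le (t v m : Int) (hm : 0 < m) :
    (-(PySem.Int.floordiv (-t) m) ≤ v) ↔ t ≤ v * m := by
  rw [neg_le, PySem.Int.le_floordiv_iff_mul_le hm, neg_mul, neg_le_neg_iff]

-- Euclidean uniqueness: v*m = t ↔ m divides t with quotient v  (m > 0)
theorem pv_eq_char (t v m : Int) (hm : 0 < m) :
    v * m = t ↔ (v = PySem.Int.floordiv t m ∧ PySem.Int.mod t m = 0) := by
  have h1 := PySem.Int.floordiv_mul_add_mod t m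
  have h2 := PySem.Int.mod_nonneg t hm
  have h3 := PySem.Int.mod_lt t hm
  set f := PySem.Int.floordiv t m with hf
  set r := PySem.Int.mod t m with hr
  constructor
  · intro h
    have hd : (v - f) * m = r := by nlinarith
    rcases lt_trichotomy v f with hlt | heq | hgt
    · nlinarith
    · exact ⟨heq, by nlinarith⟩
    · nlinarith
  · rintro ⟨rfl, hz⟩
    nlinarith

-- A's inner loop over [1..20] at multiplier m, not-kinito: equals B's truncated range
theorem pv_seg (t m : Int) (hm : 0 < m) (pre : String) (acc : List String) :
    (PySem.List.pyRange 1 21 1).foldl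
      (fun acc x => if t ≤ x * m then acc ++ [pre ++ PySem.Int.toStr x] else acc) acc
    = acc ++ (PySem.List.pyRange (max 1 (-(PySem.Int.floordiv (-t) m))) 21 1).map
        (fun v => pre ++ PySem.Int.toStr v) := by
  rw [PySem.List.foldl_append_ite (fun x => t ≤ x * m) (fun x => pre ++ PySem.Int.toStr x)]
  congr 1
  have hcongr : List.filter (fun x => decide (t ≤ x * m)) (PySem.List.pyRange 1 21 1)
      = List.filter (fun v => decide (-(PySem.Int.floordiv (-t) m) ≤ v)) (PySem.List.pyRange 1 21 1) :=
    List.filter_congr (fun x _ => by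
      simp only [decide_eq_decide]
      exact (pv_ceil_le t x m hm).symm)
  rw [hcongr, pv_filter_le _ 20 1 21 (by omega)]

-- A's inner loop over [1..20] at multiplier m, kinito: equals B's divisibility test
theorem pv_segk (t m : Int) (hm : 0 < m) (pre : String) (acc : List String) :
    (PySem.List.pyRange 1 21 1).foldl
      (fun acc x => if x * m = t then acc ++ [pre ++ PySem.Int.toStr x] else acc) acc
    = acc ++ (if PySem.Int.mod t m = 0 ∧ 1 ≤ PySem.Int.floordiv t m ∧ PySem.Int.floordiv t m ≤ 20
        then [pre ++ PySem.Int.toStr (PySem.Int.floordiv t m)] else []) := by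
  rw [PySem.List.foldl_append_ite (fun x => x * m = t) (fun x => pre ++ PySem.Int.toStr x)]
  congr 1
  by_cases hr : PySem.Int.mod t m = 0
  · have hcongr : List.filter (fun x => decide (x * m = t)) (PySem.List.pyRange 1 21 1)
        = List.filter (fun x => decide (x = PySem.Int.floordiv t m)) (PySem.List.pyRange 1 21 1) :=
      List.filter_congr (fun x _ => by
        simp only [decide_eq_decide]
        rw [pv_eq_char t x m hm]
        simp [hr])
    rw [hcongr, pv_filter_eq _ 20 1 21 (by omega)]
    by_cases hq : 1 ≤ PySem.Int.floordiv t m ∧ PySem.Int.floordiv t m ≤ 20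
    · rw [if_pos (by omega), if_pos ⟨hr, hq⟩]
      rfl
    · rw [if_neg (by omega), if_neg (by tauto)]
      rfl
  · have hcongr : List.filter (fun x => decide (x * m = t)) (PySem.List.pyRange 1 21 1)
        = List.filter (fun _ => false) (PySem.List.pyRange 1 21 1) :=
      List.filter_congr (fun x _ => by
        simp only [decide_eq_false_iff_not]
        intro hxm
        exact hr ((pv_eq_char t x m hm).mp hxm).2)
    rw [hcongr, List.filter_false, if_neg (by tauto)]
    rfl

-- ===== VERDICT (by name: the statement is the Claim_ definition above) =====
theorem get_possibilitirs_spec : Claim_equal_get_possibilitirs := by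
  intro t k _
  unfold Spec_get_possibilitirs get_possibilitirs get_possibilitirs_alt
  cases k with
  | false =>
    simp only [List.foldl_cons, List.foldl_nil, pv_range_split, List.foldl_append, ge_iff_le,
      String.reduceEq, Bool.not_false, Bool.false_eq_true, false_and, if_false,
      ite_true, Int.reduceMul, and_true, and_false, true_and, ne_eq, not_true,
      not_false_eq_true]
    have seg : ∀ (m : Int), 0 < m → ∀ (pre : String) (acc : List String),
        List.foldl (fun acc i0 =>
            if t ≤ (if i0 = 21 then (25 : Int) else i0) * m then
              acc ++ [pre ++ if (if i0 = 21 then (25 : Int) else i0) = 25 then "B"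
                else PySem.Int.toStr (if i0 = 21 then (25 : Int) else i0)]
            else acc) acc (PySem.List.pyRange 1 21 1)
          = acc ++ (PySem.List.pyRange (max 1 (-(PySem.Int.floordiv (-t) m))) 21 1).map
              (fun v => pre ++ PySem.Int.toStr v) := by
      intro m hm pre acc
      rw [PySem.List.foldl_congr_mem _ _
        (fun acc x => if t ≤ x * m then acc ++ [pre ++ PySem.Int.toStr x] else acc) acc
        (by
          intro acc x hx
          rw [PySem.List.mem_pyRange_one] at hx
          have h21 : ¬(x = 21) := by omega
          have h25 : ¬(x = 25) := by omega
          simp only [if_neg h21, if_neg h25])]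
      exact pv_seg t m hm pre acc
    have segT : ∀ (acc : List String),
        List.foldl (fun acc i0 =>
            if i0 = 21 then acc
            else if t ≤ (if i0 = 21 then (25 : Int) else i0) * 3 then
              acc ++ ["T" ++ if (if i0 = 21 then (25 : Int) else i0) = 25 then "B"
                else PySem.Int.toStr (if i0 = 21 then (25 : Int) else i0)]
            else acc) acc (PySem.List.pyRange 1 21 1)
          = acc ++ (PySem.List.pyRange (max 1 (-(PySem.Int.floordiv (-t) 3))) 21 1).map
              (fun v => "T" ++ PySem.Int.toStr v) := by
      intro acc
      rw [PySem.List.foldl_congr_mem _ _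
        (fun acc x => if t ≤ x * 3 then acc ++ ["T" ++ PySem.Int.toStr x] else acc) acc
        (by
          intro acc x hx
          rw [PySem.List.mem_pyRange_one] at hx
          have h21 : ¬(x = 21) := by omega
          have h25 : ¬(x = 25) := by omega
          simp only [if_neg h21, if_neg h25])]
      exact pv_seg t 3 (by norm_num) "T" acc
    simp only [seg 1 (by norm_num) "S", seg 2 (by norm_num) "D", segT]
  | true =>
    simp only [List.foldl_cons, List.foldl_nil, pv_range_split, List.foldl_append, ge_iff_le,
      String.reduceEq, Bool.not_true, Bool.true_eq_false, Bool.false_eq_true,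
      false_and, if_false, ite_true, Int.reduceMul, and_true,
      and_false, true_and, ne_eq, not_true, not_false_eq_true]
    have segk : ∀ (m : Int), 0 < m → ∀ (pre : String) (acc : List String),
        List.foldl (fun acc i0 =>
            if (if i0 = 21 then (25 : Int) else i0) * m = t then
              acc ++ [pre ++ if (if i0 = 21 then (25 : Int) else i0) = 25 then "B"
                else PySem.Int.toStr (if i0 = 21 then (25 : Int) else i0)]
            else acc) acc (PySem.List.pyRange 1 21 1)
          = acc ++ (if PySem.Int.mod t m = 0 ∧ 1 ≤ PySem.Int.floordiv t m ∧ PySem.Int.floordiv t m ≤ 20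
              then [pre ++ PySem.Int.toStr (PySem.Int.floordiv t m)] else []) := by
      intro m hm pre acc
      rw [PySem.List.foldl_congr_mem _ _
        (fun acc x => if x * m = t then acc ++ [pre ++ PySem.Int.toStr x] else acc) acc
        (by
          intro acc x hx
          rw [PySem.List.mem_pyRange_one] at hx
          have h21 : ¬(x = 21) := by omega
          have h25 : ¬(x = 25) := by omega
          simp only [if_neg h21, if_neg h25])]
      exact pv_segk t m hm pre acc
    have segkT : ∀ (acc : List String),
        List.foldl (fun acc i0 =>
            if i0 = 21 then acc
            else if (if i0 = 21 then (25 : Int) else i0) * 3 = t then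
              acc ++ ["T" ++ if (if i0 = 21 then (25 : Int) else i0) = 25 then "B"
                else PySem.Int.toStr (if i0 = 21 then (25 : Int) else i0)]
            else acc) acc (PySem.List.pyRange 1 21 1)
          = acc ++ (if PySem.Int.mod t 3 = 0 ∧ 1 ≤ PySem.Int.floordiv t 3 ∧ PySem.Int.floordiv t 3 ≤ 20
              then ["T" ++ PySem.Int.toStr (PySem.Int.floordiv t 3)] else []) := by
      intro acc
      rw [PySem.List.foldl_congr_mem _ _
        (fun acc x => if x * 3 = t then acc ++ ["T" ++ PySem.Int.toStr x] else acc) acc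
        (by
          intro acc x hx
          rw [PySem.List.mem_pyRange_one] at hx
          have h21 : ¬(x = 21) := by omega
          have h25 : ¬(x = 25) := by omega
          simp only [if_neg h21, if_neg h25])]
      exact pv_segk t 3 (by norm_num) "T" acc
    simp only [segk 1 (by norm_num) "S", segk 2 (by norm_num) "D", segkT,
      show ((25 : Int) = t) = (t = 25) from propext eq_comm,
      show ((50 : Int) = t) = (t = 50) from propext eq_comm]
    split_ifs <;> simp
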